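-- pv_equiv track=rewrite | github.com/grvyshnavi/Block-chain-Enabled-Secure-Incident-Logging-and-Digital-Forensics-Framework | forensics.py | _estimate_sophistication
-- ===== SOURCE A (Python) =====
-- from typing import List, Dict, Optional, Tuple
--
-- def _estimate_sophistication(attack_types: List[str]) -> str:
--     high_soph = {"ZERO_DAY_EXPLOIT", "RANSOMWARE", "INSIDER_THREAT", "PRIVILEGE_ESCALATION"}
--     med_soph = {"NETWORK_INTRUSION", "MALWARE_DETECTED", "DATA_BREACH"}
--     if any(t in high_soph for t in attack_types):
--         return "ADVANCED PERSISTENT THREAT (APT)"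
--     if any(t in med_soph for t in attack_types):
--         return "INTERMEDIATE"
--     return "OPPORTUNISTIC"
-- ===== SOURCE B (Python) =====
-- def _level(t):
--     levels = {"ZERO_DAY_EXPLOIT": 2, "RANSOMWARE": 2, "INSIDER_THREAT": 2,
--               "PRIVILEGE_ESCALATION": 2, "NETWORK_INTRUSION": 1,
--               "MALWARE_DETECTED": 1, "DATA_BREACH": 1}
--     return levels.get(t, 0)
--
-- def _estimate_sophistication(attack_types):
--     m = 0
--     for t in attack_types:
--         m = max(m, _level(t))
--     return "ADVANCED PERSISTENT THREAT (APT)" if m == 2 else ("INTERMEDIATE" if m == 1 else "OPPORTUNISTIC")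
-- ===== Notes on version B (the rewrite author's own statement) =====
-- stated objective: alternative
-- what changed: Replaced the two priority-ordered short-circuit any-scans over two sets by a single pass that maps each attack type to a numeric sophistication level, reduces by max, and translates the maximal level into its label.
import Mathlib
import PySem

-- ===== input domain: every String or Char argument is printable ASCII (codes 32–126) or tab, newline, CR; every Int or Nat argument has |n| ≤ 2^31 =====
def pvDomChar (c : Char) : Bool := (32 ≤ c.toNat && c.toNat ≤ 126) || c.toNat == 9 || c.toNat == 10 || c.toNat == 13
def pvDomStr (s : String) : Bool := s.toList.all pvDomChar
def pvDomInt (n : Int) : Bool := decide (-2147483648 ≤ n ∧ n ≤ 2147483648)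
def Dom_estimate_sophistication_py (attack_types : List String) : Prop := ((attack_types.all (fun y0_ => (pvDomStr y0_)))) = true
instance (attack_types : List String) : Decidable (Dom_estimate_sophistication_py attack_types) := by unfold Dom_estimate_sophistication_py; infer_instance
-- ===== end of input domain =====

-- B replaces A's two priority-ordered any-scans by a single max-reduce over per-element levels plus a level-to-label table (alternative decomposition, same cost).


-- ===== PORT A =====
def pvHighSoph : PySem.Set String :=
  PySem.Set.ofList ["ZERO_DAY_EXPLOIT", "RANSOMWARE", "INSIDER_THREAT", "PRIVILEGE_ESCALATION"]
def pvMedSoph : PySem.Set String :=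
  PySem.Set.ofList ["NETWORK_INTRUSION", "MALWARE_DETECTED", "DATA_BREACH"]

def estimate_sophistication_py (attack_types : List String) : String :=
  if attack_types.any (fun t => pvHighSoph.contains t) then "ADVANCED PERSISTENT THREAT (APT)"
  else if attack_types.any (fun t => pvMedSoph.contains t) then "INTERMEDIATE"
  else "OPPORTUNISTIC"

-- ===== PORT B =====
def pvLevels : PySem.Dict String Int :=
  PySem.Dict.ofList [("ZERO_DAY_EXPLOIT", 2), ("RANSOMWARE", 2), ("INSIDER_THREAT", 2),
    ("PRIVILEGE_ESCALATION", 2), ("NETWORK_INTRUSION", 1), ("MALWARE_DETECTED", 1),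
    ("DATA_BREACH", 1)]

def pvLevel (t : String) : Int := pvLevels.getD t 0

def estimate_sophistication_py_alt (attack_types : List String) : String :=
  let m := attack_types.foldl (fun a t => max a (pvLevel t)) 0
  if m = 2 then "ADVANCED PERSISTENT THREAT (APT)"
  else if m = 1 then "INTERMEDIATE" else "OPPORTUNISTIC"

-- ===== PRECONDITION & SPEC =====
def Spec_estimate_sophistication_py (attack_types : List String) (out : String) : Prop := out = estimate_sophistication_py_alt attack_types
instance (attack_types : List String) (out : String) : Decidable (Spec_estimate_sophistication_py attack_types out) := by unfold Spec_estimate_sophistication_py; infer_instance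

-- ===== CLAIM (what is proved, stated in full; the proofs are below) =====
def Claim_equal_estimate_sophistication_py : Prop := ∀ (attack_types : List String), Dom_estimate_sophistication_py attack_types → Spec_estimate_sophistication_py attack_types (estimate_sophistication_py attack_types)

-- ===== LEMMAS AND PROOFS =====

-- abbreviation for B's running maximum
def pvMaxLvl (xs : List String) : Int := xs.foldl (fun a t => max a (pvLevel t)) 0

theorem pvLevel_eq (t : String) :
    pvLevel t = if pvHighSoph.contains t then 2 else if pvMedSoph.contains t then 1 else 0 := by
  by_cases h1 : t = "ZERO_DAY_EXPLOIT"; · subst h1; decide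
  by_cases h2 : t = "RANSOMWARE"; · subst h2; decide
  by_cases h3 : t = "INSIDER_THREAT"; · subst h3; decide
  by_cases h4 : t = "PRIVILEGE_ESCALATION"; · subst h4; decide
  by_cases h5 : t = "NETWORK_INTRUSION"; · subst h5; decide
  by_cases h6 : t = "MALWARE_DETECTED"; · subst h6; decide
  by_cases h7 : t = "DATA_BREACH"; · subst h7; decide
  simp [pvLevel, pvLevels, pvHighSoph, pvMedSoph, PySem.Set.ofList, PySem.Set.contains,
    PySem.Dict.ofList, PySem.Dict.update, PySem.Dict.getD_insert, PySem.Dict.getD_empty,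
    h1, h2, h3, h4, h5, h6, h7]

theorem pvLevel_nonneg (t : String) : 0 ≤ pvLevel t := by
  rw [pvLevel_eq]; split_ifs <;> omega

theorem pvMaxLvl_shift (xs : List String) (a : Int) (ha : 0 ≤ a) :
    xs.foldl (fun a t => max a (pvLevel t)) a = max a (pvMaxLvl xs) := by
  induction xs generalizing a with
  | nil => simp [pvMaxLvl]; omega
  | cons h t ih =>
    have hl := pvLevel_nonneg h
    simp only [pvMaxLvl, List.foldl] at *
    rw [ih _ (by omega), ih (max 0 (pvLevel h)) (by omega)]
    omega

theorem pvMaxLvl_cons (h : String) (t : List String) :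
    pvMaxLvl (h :: t) = max (pvLevel h) (pvMaxLvl t) := by
  have hl := pvLevel_nonneg h
  have hshift := pvMaxLvl_shift t (max 0 (pvLevel h)) (by omega)
  simp only [pvMaxLvl, List.foldl] at *
  omega

theorem pvMaxLvl_char (xs : List String) :
    pvMaxLvl xs = if xs.any (fun t => pvHighSoph.contains t) then 2
      else if xs.any (fun t => pvHighSoph.contains t || pvMedSoph.contains t) then 1 else 0 := by
  induction xs with
  | nil => simp [pvMaxLvl]
  | cons h t ih =>
    rw [pvMaxLvl_cons, ih, pvLevel_eq]
    simp only [List.any_cons, List.any_eq_true, Bool.or_eq_true, PySem.Set.contains_iff]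
    by_cases hh : h ∈ pvHighSoph <;> by_cases hm : h ∈ pvMedSoph <;>
      by_cases th : ∃ x ∈ t, x ∈ pvHighSoph <;>
      by_cases tb : ∃ x ∈ t, x ∈ pvHighSoph ∨ x ∈ pvMedSoph <;>
      first
      | (obtain ⟨x, hx, hc⟩ := th; exact absurd ⟨x, hx, Or.inl hc⟩ tb)
      | (simp [hh, hm, th, tb]; try omega)

theorem estimate_sophistication_py_spec' (xs : List String) :
    estimate_sophistication_py xs = estimate_sophistication_py_alt xs := by
  have halt : estimate_sophistication_py_alt xs =
      if pvMaxLvl xs = 2 then "ADVANCED PERSISTENT THREAT (APT)"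
      else if pvMaxLvl xs = 1 then "INTERMEDIATE" else "OPPORTUNISTIC" := rfl
  rw [halt, pvMaxLvl_char]
  unfold estimate_sophistication_py
  simp only [List.any_eq_true, Bool.or_eq_true, PySem.Set.contains_iff]
  by_cases hH : ∃ x ∈ xs, x ∈ pvHighSoph
  · simp [hH]
  · by_cases hM : ∃ x ∈ xs, x ∈ pvMedSoph
    · have hOr : ∃ x ∈ xs, x ∈ pvHighSoph ∨ x ∈ pvMedSoph := by
        obtain ⟨x, hx, hc⟩ := hM; exact ⟨x, hx, Or.inr hc⟩
      simp [hH, hM, hOr]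
    · have hOr : ¬ ∃ x ∈ xs, x ∈ pvHighSoph ∨ x ∈ pvMedSoph := by
        rintro ⟨x, hx, hc | hc⟩
        · exact hH ⟨x, hx, hc⟩
        · exact hM ⟨x, hx, hc⟩
      simp [hH, hM, hOr]

-- ===== VERDICT (by name: the statement is the Claim_ definition above) =====
theorem estimate_sophistication_py_spec : Claim_equal_estimate_sophistication_py := by
  intro xs _
  exact estimate_sophistication_py_spec' xs
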